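-- pv_equiv track=rewrite | github.com/mdok720-svg/Concours-BPI-France | corpus/build_corpus.py | build_windows
-- ===== SOURCE A (Python) =====
-- WINDOW_SIZE = 3
--
-- def build_windows(sentences: list[str],
--                   keywords: list[str]) -> list[str]:
--     """
--     Pour chaque phrase qui contient un keyword, construit une "fenêtre"
--     de WINDOW_SIZE phrases (la phrase + les suivantes) et retourne ces
--     fenêtres comme extraits candidats.
--
--     Déduplique les fenêtres qui se chevauchent en ne conservant que la
--     première d'une séquence consécutive de phrases matching.
--     """
--     windows = []
--     i = 0
--     n = len(sentences)
--     while i < n: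
--         s = sentences[i]
--         if contains_keywords(s, keywords):
--             # Fenêtre : phrase i et les WINDOW_SIZE-1 suivantes
--             window_sentences = sentences[i:i + WINDOW_SIZE]
--             windows.append(" ".join(window_sentences))
--             # On saute la taille de la fenêtre pour éviter les
--             # chevauchements trop forts entre exemples successifs.
--             i += WINDOW_SIZE
--         else:
--             i += 1
--     return windows
--
-- def contains_keywords(text: str, keywords: list[str]) -> bool:
--     """True si le paragraphe contient au moins un mot-clé (case-insensitive)."""
--     low = text.lower()
--     return any(kw.lower() in low for kw in keywords)
-- ===== SOURCE B (Python) =====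
-- WINDOW_SIZE = 3
--
--
-- def _matches(s: str, lows: list[str]) -> bool:
--     low = s.lower()
--     return any(k in low for k in lows)
--
--
-- def build_windows(sentences: list[str],
--                   keywords: list[str]) -> list[str]:
--     # Pass 1: lower the keywords once, then find the indices of all
--     # sentences containing at least one keyword (case-insensitive).
--     lows = [kw.lower() for kw in keywords]
--     match_indices = [i for i, s in enumerate(sentences) if _matches(s, lows)]
--     # Pass 2: greedy window selection over the match indices.
--     windows = []
--     next_allowed = 0
--     for idx in match_indices:
--         if idx >= next_allowed:
--             windows.append(" ".join(sentences[idx:idx + WINDOW_SIZE]))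
--             next_allowed = idx + WINDOW_SIZE
--     return windows
-- ===== Notes on version B (the rewrite author's own statement) =====
-- stated objective: alternative
-- what changed: Replaces A's single interleaved variable-step while loop with a two-pass decomposition: one pass lowers the keywords once and collects the indices of keyword-matching sentences, then a separate greedy pass over those indices with a next_allowed cutoff selects non-overlapping windows.
import Mathlib
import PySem

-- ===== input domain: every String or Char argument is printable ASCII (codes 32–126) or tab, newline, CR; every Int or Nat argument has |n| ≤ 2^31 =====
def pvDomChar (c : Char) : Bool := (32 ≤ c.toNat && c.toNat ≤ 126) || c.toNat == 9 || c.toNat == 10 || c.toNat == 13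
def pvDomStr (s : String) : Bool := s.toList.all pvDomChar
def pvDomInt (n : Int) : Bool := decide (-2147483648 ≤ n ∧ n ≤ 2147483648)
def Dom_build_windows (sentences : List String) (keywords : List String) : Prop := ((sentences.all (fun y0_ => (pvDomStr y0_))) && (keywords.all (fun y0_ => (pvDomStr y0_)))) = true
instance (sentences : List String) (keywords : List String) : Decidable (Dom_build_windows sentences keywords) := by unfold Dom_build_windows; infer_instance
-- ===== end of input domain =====

-- B replaces A's interleaved variable-step while loop by a two-pass decomposition
-- (collect matching indices, then greedy cutoff selection); alternative structure, proved equal.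


-- ===== PORT A =====
-- module-level helper contains_keywords of A
def pvContainsKeywords (text : String) (keywords : List String) : Bool :=
  let low := PySem.Str.lower text
  keywords.any (fun kw => PySem.Str.isIn (PySem.Str.lower kw) low)

-- the while loop of A (state: windows, i), recursion on the remaining length
def buildWindowsLoop (sentences : List String) (keywords : List String)
    (windows : List String) (i : Nat) : List String :=
  if h : i < sentences.length then
    let s := sentences[i]
    if pvContainsKeywords s keywords then
      let window_sentences := PySem.List.slice sentences (some (i : Int)) (some ((i : Int) + 3))
      buildWindowsLoop sentences keywords
        (windows ++ [PySem.Str.join " " window_sentences]) (i + 3)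
    else
      buildWindowsLoop sentences keywords windows (i + 1)
  else windows
termination_by sentences.length - i

def build_windows (sentences : List String) (keywords : List String) : List String :=
  buildWindowsLoop sentences keywords [] 0

-- ===== PORT B =====
-- B's helper _matches
def pvMatches (s : String) (lows : List String) : Bool :=
  let low := PySem.Str.lower s
  lows.any (fun k => PySem.Str.isIn k low)

def build_windows_alt (sentences : List String) (keywords : List String) : List String :=
  let lows := keywords.map (fun kw => PySem.Str.lower kw)
  let match_indices :=
    ((PySem.List.enumerate sentences).filter
      (fun p => pvMatches p.2 lows)).map (fun p => p.1)
  (match_indices.foldl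
    (fun (st : List String × Int) idx =>
      if st.2 ≤ idx then
        (st.1 ++ [PySem.Str.join " " (PySem.List.slice sentences (some idx) (some (idx + 3)))],
         idx + 3)
      else st)
    ([], 0)).1

-- ===== PRECONDITION & SPEC =====
def Spec_build_windows (sentences : List String) (keywords : List String) (out : List String) : Prop := out = build_windows_alt sentences keywords
instance (sentences : List String) (keywords : List String) (out : List String) : Decidable (Spec_build_windows sentences keywords out) := by unfold Spec_build_windows; infer_instance

-- ===== CLAIM (what is proved, stated in full; the proofs are below) =====
def Claim_equal_build_windows : Prop := ∀ (sentences : List String) (keywords : List String), Dom_build_windows sentences keywords → Spec_build_windows sentences keywords (build_windows sentences keywords)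

-- ===== LEMMAS AND PROOFS =====

-- common reference function: the windows produced from position i onwards
def gWin (se ke : List String) (i : Nat) : List String :=
  if h : i < se.length then
    if pvContainsKeywords se[i] ke then
      PySem.Str.join " " (PySem.List.slice se (some (i : Int)) (some ((i : Int) + 3)))
        :: gWin se ke (i + 3)
    else gWin se ke (i + 1)
  else []
termination_by se.length - i

-- greedy cutoff selection over a list of indices (the recursion behind B's fold)
def greedySel (se : List String) : List Int → Int → List String
  | [], _ => []
  | j :: t, c =>
    if c ≤ j then
      PySem.Str.join " " (PySem.List.slice se (some j) (some (j + 3))) :: greedySel se t (j + 3)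
    else greedySel se t c

-- the match-index list from position i onwards
def matchList (se ke : List String) (i : Nat) : List Int :=
  ((PySem.List.enumerate (se.drop i) (i : Int)).filter
    (fun p => pvContainsKeywords p.2 ke)).map (fun p => p.1)

theorem loop_eq_gWin (se ke : List String) :
    ∀ k i ws, se.length - i = k → buildWindowsLoop se ke ws i = ws ++ gWin se ke i := by
  intro k
  induction k using Nat.strong_induction_on with
  | _ k ih =>
    intro i ws hk
    rw [buildWindowsLoop, gWin]
    by_cases h : i < se.length
    · simp only [h, dif_pos]
      by_cases hp : pvContainsKeywords se[i] ke
      · simp only [hp, if_pos]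
        rw [ih (se.length - (i + 3)) (by omega) (i + 3) _ rfl]
        simp
      · simp only [hp, Bool.false_eq_true, if_false]
        rw [ih (se.length - (i + 1)) (by omega) (i + 1) ws rfl]
    · simp [h]

theorem foldl_eq_greedySel (se : List String) :
    ∀ (l : List Int) (ws : List String) (c : Int),
      (l.foldl
        (fun (st : List String × Int) idx =>
          if st.2 ≤ idx then
            (st.1 ++ [PySem.Str.join " " (PySem.List.slice se (some idx) (some (idx + 3)))],
             idx + 3)
          else st) (ws, c)).1 = ws ++ greedySel se l c := by
  intro l
  induction l with
  | nil => intro ws c; simp [greedySel]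
  | cons j t ih =>
    intro ws c
    rw [greedySel, List.foldl_cons]
    by_cases h : c ≤ j
    · simp only [if_pos h]
      rw [ih]; simp
    · simp only [if_neg h]
      rw [ih]

theorem mem_matchList_le (se ke : List String) (a : Nat) :
    ∀ x ∈ matchList se ke a, (a : Int) ≤ x := by
  intro x hx
  unfold matchList at hx
  simp only [List.mem_map, List.mem_filter] at hx
  obtain ⟨p, ⟨hpm, _⟩, hpx⟩ := hx
  rw [PySem.List.mem_enumerate_iff] at hpm
  obtain ⟨k, hk, rfl⟩ := hpm
  simp at hpx
  omega

theorem matchList_filter (se ke : List String) :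
    ∀ d a b : Nat, b - a = d → a ≤ b →
      (matchList se ke a).filter (fun j => decide ((b : Int) ≤ j)) = matchList se ke b := by
  intro d
  induction d with
  | zero =>
    intro a b hd hab
    have : a = b := by omega
    subst this
    apply List.filter_eq_self.2
    intro x hx
    simpa using mem_matchList_le se ke a x hx
  | succ d ih =>
    intro a b hd hab
    have hab' : a < b := by omega
    by_cases h : a < se.length
    · have hdrop : se.drop a = se[a] :: se.drop (a + 1) := List.drop_eq_getElem_cons h
      have hml : matchList se ke a =
          (if pvContainsKeywords se[a] ke then [(a : Int)] else []) ++ matchList se ke (a + 1) := by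
        unfold matchList
        rw [hdrop, PySem.List.enumerate_cons]
        by_cases hp : pvContainsKeywords se[a] ke <;> simp [hp]
      rw [hml, List.filter_append]
      have h2 := ih (a + 1) b (by omega) (by omega)
      rw [h2]
      by_cases hp : pvContainsKeywords se[a] ke <;> simp [hp]
      omega
    · have h1 : matchList se ke a = [] := by
        unfold matchList
        rw [List.drop_eq_nil_of_le (by omega)]
        simp [PySem.List.enumerate]
      have h2 : matchList se ke b = [] := by
        unfold matchList
        rw [List.drop_eq_nil_of_le (by omega)]
        simp [PySem.List.enumerate]
      simp [h1, h2]

theorem greedySel_filter (se : List String) :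
    ∀ (l : List Int) (c d : Int), d ≤ c →
      greedySel se (l.filter (fun j => decide (d ≤ j))) c = greedySel se l c := by
  intro l
  induction l with
  | nil => intro c d _; simp
  | cons j t ih =>
    intro c d hdc
    by_cases hd : d ≤ j
    · rw [List.filter_cons_of_pos (by simpa using hd)]
      rw [greedySel, greedySel]
      by_cases hc : c ≤ j
      · simp only [if_pos hc]
        rw [ih (j + 3) d (by omega)]
      · simp only [if_neg hc]
        exact ih c d hdc
    · rw [List.filter_cons_of_neg (by simpa using hd)]
      rw [greedySel]
      have hc : ¬ c ≤ j := by omega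
      simp only [if_neg hc]
      exact ih c d hdc

theorem greedySel_congr (se : List String) :
    ∀ (l : List Int) (c c' : Int), (∀ x ∈ l, (c ≤ x ↔ c' ≤ x)) →
      greedySel se l c = greedySel se l c' := by
  intro l
  induction l with
  | nil => intro c c' _; rfl
  | cons j t ih =>
    intro c c' h
    rw [greedySel, greedySel]
    by_cases hc : c ≤ j
    · have hc' : c' ≤ j := (h j (by simp)).1 hc
      simp [hc, hc']
    · have hc' : ¬ c' ≤ j := fun hx => hc ((h j (by simp)).2 hx)
      simp only [if_neg hc, if_neg hc']
      exact ih c c' (fun x hx => h x (by simp [hx]))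

theorem greedySel_matchList (se ke : List String) :
    ∀ k i, se.length - i = k →
      greedySel se (matchList se ke i) (i : Int) = gWin se ke i := by
  intro k
  induction k using Nat.strong_induction_on with
  | _ k ih =>
    intro i hk
    rw [gWin]
    by_cases h : i < se.length
    · have hdrop : se.drop i = se[i] :: se.drop (i + 1) := List.drop_eq_getElem_cons h
      have hml : matchList se ke i =
          (if pvContainsKeywords se[i] ke then [(i : Int)] else []) ++ matchList se ke (i + 1) := by
        unfold matchList
        rw [hdrop, PySem.List.enumerate_cons]
        by_cases hp : pvContainsKeywords se[i] ke <;> simp [hp]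
      simp only [h, dif_pos]
      by_cases hp : pvContainsKeywords se[i] ke
      · simp only [hp, if_pos]
        rw [hml, if_pos hp]
        rw [List.singleton_append, greedySel, if_pos (le_refl _)]
        congr 1
        have hfil : (matchList se ke (i + 1)).filter (fun j => decide (((i + 3 : Nat) : Int) ≤ j))
            = matchList se ke (i + 3) :=
          matchList_filter se ke 2 (i + 1) (i + 3) (by omega) (by omega)
        rw [show ((i : Int) + 3) = ((i + 3 : Nat) : Int) by push_cast; ring]
        rw [← greedySel_filter se (matchList se ke (i + 1)) ((i + 3 : Nat) : Int)
          ((i + 3 : Nat) : Int) (le_refl _), hfil]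
        exact ih (se.length - (i + 3)) (by omega) (i + 3) rfl
      · simp only [hp, Bool.false_eq_true, if_false]
        rw [hml, if_neg hp, List.nil_append]
        have hcongr : greedySel se (matchList se ke (i + 1)) (i : Int)
            = greedySel se (matchList se ke (i + 1)) ((i + 1 : Nat) : Int) := by
          apply greedySel_congr
          intro x hx
          have := mem_matchList_le se ke (i + 1) x hx
          push_cast at *
          omega
        rw [hcongr]
        exact ih (se.length - (i + 1)) (by omega) (i + 1) rfl
    · have h1 : matchList se ke i = [] := by
        unfold matchList
        rw [List.drop_eq_nil_of_le (by omega)]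
        simp [PySem.List.enumerate]
      simp [h, h1, greedySel]

-- ===== VERDICT (by name: the statement is the Claim_ definition above) =====
theorem build_windows_spec : Claim_equal_build_windows := by
  intro sentences keywords _
  unfold Spec_build_windows build_windows build_windows_alt
  rw [loop_eq_gWin sentences keywords (sentences.length - 0) 0 [] rfl, List.nil_append]
  rw [foldl_eq_greedySel, List.nil_append]
  have hm : ((PySem.List.enumerate sentences).filter
      (fun p => pvMatches p.2 (keywords.map (fun kw => PySem.Str.lower kw)))).map (fun p => p.1)
      = matchList sentences keywords 0 := by
    unfold matchList
    simp [pvMatches, List.any_map, pvContainsKeywords, Function.comp_def]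
  rw [hm, show (0 : Int) = ((0 : Nat) : Int) by simp]
  exact (greedySel_matchList sentences keywords (sentences.length - 0) 0 rfl).symm
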